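-- pv_equiv track=rewrite | github.com/DenisAlaime/Chauffage_Henallux_Virton | generateur_horaire_v2.py | merge_contiguous_events
-- ===== SOURCE A (Python) =====
-- from typing import Optional, List, Dict, Any
--
-- def _hhmm_to_minutes(hhmm: str) -> int:
--     try:
--         return int(hhmm[:2]) * 60 + int(hhmm[2:4])
--     except Exception:
--         return 0
--
-- def _minutes_to_hhmm(m: int) -> str:
--     h = (m // 60) % 24
--     mn = m % 60
--     return f"{h:02d}{mn:02d}"
--
-- def merge_contiguous_events(day_events: List[Dict[str, str]]) -> List[Dict[str, str]]:
--     """Regroupe les créneaux contigus si TimeEND == TimeSTART suivant et (LOCATION,SUMMARY) identiques."""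
--     if not day_events:
--         return []
--     day_events = sorted(day_events, key=lambda e: (e.get("LOCATION",""), e.get("SUMMARY",""), e.get("TimeSTART",""), e.get("TimeEND","")))
--     merged: List[Dict[str, str]] = []
--     cur: Optional[Dict[str, str]] = None
--     for e in day_events:
--         if cur is None:
--             cur = dict(e)
--             continue
--         same_loc = e.get("LOCATION","") == cur.get("LOCATION","")
--         same_sum = e.get("SUMMARY","") == cur.get("SUMMARY","")
--         if same_loc and same_sum:
--             end_cur = _hhmm_to_minutes(cur.get("TimeEND","0000"))
--             start_e = _hhmm_to_minutes(e.get("TimeSTART","0000"))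
--             if start_e == end_cur:
--                 end_e = _hhmm_to_minutes(e.get("TimeEND","0000"))
--                 if end_e > end_cur:
--                     cur["TimeEND"] = _minutes_to_hhmm(end_e)
--                 continue
--         merged.append(cur)
--         cur = dict(e)
--     if cur is not None:
--         merged.append(cur)
--     return merged
-- ===== SOURCE B (Python) =====
-- from typing import List, Dict
--
-- def _hhmm_to_minutes(hhmm: str) -> int:
--     try:
--         return int(hhmm[:2]) * 60 + int(hhmm[2:4])
--     except Exception:
--         return 0
--
-- def _minutes_to_hhmm(m: int) -> str:
--     h = (m // 60) % 24
--     mn = m % 60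
--     return f"{h:02d}{mn:02d}"
--
-- def merge_contiguous_events(day_events: List[Dict[str, str]]) -> List[Dict[str, str]]:
--     """Group events by (LOCATION, SUMMARY) first, then merge each group independently."""
--     keys = sorted({(e.get("LOCATION", ""), e.get("SUMMARY", "")) for e in day_events})
--     out: List[Dict[str, str]] = []
--     for key in keys:
--         evs = sorted((e for e in day_events
--                       if (e.get("LOCATION", ""), e.get("SUMMARY", "")) == key),
--                      key=lambda e: (e.get("TimeSTART", ""), e.get("TimeEND", "")))
--         cur = dict(evs[0])
--         for e in evs[1:]:
--             start_e = _hhmm_to_minutes(e.get("TimeSTART", "0000"))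
--             end_cur = _hhmm_to_minutes(cur.get("TimeEND", "0000"))
--             if start_e == end_cur:
--                 end_e = _hhmm_to_minutes(e.get("TimeEND", "0000"))
--                 if end_e > end_cur:
--                     cur["TimeEND"] = _minutes_to_hhmm(end_e)
--             else:
--                 out.append(cur)
--                 cur = dict(e)
--         out.append(cur)
--     return out
-- ===== Notes on version B (the rewrite author's own statement) =====
-- stated objective: alternative
-- what changed: B builds the sorted list of distinct (LOCATION, SUMMARY) keys first and then, for each key group separately, sorts only that group's events by (TimeSTART, TimeEND) and merges contiguous ones, instead of A's single pass over one globally 4-tuple-sorted list that flushes the accumulator whenever the key changes.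
import Mathlib
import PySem

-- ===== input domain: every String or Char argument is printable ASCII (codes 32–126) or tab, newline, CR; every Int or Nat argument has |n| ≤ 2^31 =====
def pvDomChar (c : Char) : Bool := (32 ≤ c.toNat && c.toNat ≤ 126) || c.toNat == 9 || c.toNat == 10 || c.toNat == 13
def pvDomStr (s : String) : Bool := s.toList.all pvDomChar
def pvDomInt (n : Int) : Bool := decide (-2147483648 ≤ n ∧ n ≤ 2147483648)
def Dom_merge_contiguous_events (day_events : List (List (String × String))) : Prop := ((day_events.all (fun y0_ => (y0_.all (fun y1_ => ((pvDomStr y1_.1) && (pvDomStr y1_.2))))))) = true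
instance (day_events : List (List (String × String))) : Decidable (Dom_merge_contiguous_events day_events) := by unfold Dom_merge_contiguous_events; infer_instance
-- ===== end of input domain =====

-- B groups events by (LOCATION, SUMMARY) — sorted distinct keys, then a per-group sort by
-- (TimeSTART, TimeEND) and an independent per-group merge — instead of A's single pass over one
-- globally 4-tuple-sorted list with flush-on-key-change (objective: alternative decomposition).


-- ===== PORT A =====
-- shared helpers of the Python module (dicts are association lists: lookup = first match)

-- e.get(k, dflt): value of the first pair with key k, else dflt
def pvGet (e : List (String × String)) (k dflt : String) : String :=
  match e with
  | [] => dflt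
  | (k', v) :: t => if k' = k then v else pvGet t k dflt

-- e[k] = v: overwrite the first pair with key k in place, else append (Python dict assignment)
def pvSet (e : List (String × String)) (k v : String) : List (String × String) :=
  match e with
  | [] => [(k, v)]
  | (k', v') :: t => if k' = k then (k, v) :: t else (k', v') :: pvSet t k v

-- _hhmm_to_minutes: int(hhmm[:2])*60 + int(hhmm[2:4]), 0 on any ValueError
def pvHHMM (s : String) : Int :=
  match PySem.Int.ofStr? (PySem.Str.slice s none (some 2)),
        PySem.Int.ofStr? (PySem.Str.slice s (some 2) (some 4)) with
  | some a, some b => a * 60 + b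
  | _, _ => 0

-- _minutes_to_hhmm: f"{(m//60)%24:02d}{m%60:02d}" (both fields are ≥ 0, so 02d = zfill 2)
def pvM2H (m : Int) : String :=
  let h := PySem.Int.mod (PySem.Int.floordiv m 60) 24
  let mn := PySem.Int.mod m 60
  PySem.Str.join "" [PySem.Str.zfill (PySem.Int.toStr h) 2, PySem.Str.zfill (PySem.Int.toStr mn) 2]

-- loop body of A's single pass (state: merged so far, current event or none)
def pvStepA (st : List (List (String × String)) × Option (List (String × String)))
    (e : List (String × String)) :
    List (List (String × String)) × Option (List (String × String)) :=
  match st.2 with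
  | none => (st.1, some e)
  | some cur =>
    if pvGet e "LOCATION" "" = pvGet cur "LOCATION" "" ∧ pvGet e "SUMMARY" "" = pvGet cur "SUMMARY" "" then
      let end_cur := pvHHMM (pvGet cur "TimeEND" "0000")
      let start_e := pvHHMM (pvGet e "TimeSTART" "0000")
      if start_e = end_cur then
        let end_e := pvHHMM (pvGet e "TimeEND" "0000")
        if end_e > end_cur then (st.1, some (pvSet cur "TimeEND" (pvM2H end_e))) else (st.1, some cur)
      else (st.1 ++ [cur], some e)
    else (st.1 ++ [cur], some e)

def merge_contiguous_events (day_events : List (List (String × String))) : List (List (String × String)) :=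
  if day_events = [] then []
  else
    let sortedE := PySem.List.sorted day_events
      (fun e => [(pvGet e "LOCATION" "").toList, (pvGet e "SUMMARY" "").toList,
                 (pvGet e "TimeSTART" "").toList, (pvGet e "TimeEND" "").toList]) false
    let st := sortedE.foldl pvStepA ([], none)
    match st.2 with
    | none => st.1
    | some cur => st.1 ++ [cur]

-- ===== PORT B =====
-- loop body of B's per-group merge (state: out so far, current event)
def pvStepB (s : List (List (String × String)) × List (String × String))
    (e : List (String × String)) :
    List (List (String × String)) × List (String × String) :=
  let start_e := pvHHMM (pvGet e "TimeSTART" "0000")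
  let end_cur := pvHHMM (pvGet s.2 "TimeEND" "0000")
  if start_e = end_cur then
    let end_e := pvHHMM (pvGet e "TimeEND" "0000")
    if end_e > end_cur then (s.1, pvSet s.2 "TimeEND" (pvM2H end_e)) else (s.1, s.2)
  else (s.1 ++ [s.2], e)

def merge_contiguous_events_alt (day_events : List (List (String × String))) : List (List (String × String)) :=
  let keys := PySem.List.sorted
    (PySem.Set.ofList (day_events.map (fun e => [(pvGet e "LOCATION" "").toList, (pvGet e "SUMMARY" "").toList])))
    (fun k => k) false
  keys.foldl (fun out k =>
    let evs := PySem.List.sorted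
      (day_events.filter (fun e => decide ([(pvGet e "LOCATION" "").toList, (pvGet e "SUMMARY" "").toList] = k)))
      (fun e => [(pvGet e "TimeSTART" "").toList, (pvGet e "TimeEND" "").toList]) false
    match evs with
    | [] => out     -- unreachable (each key comes from an event); totality guard
    | c0 :: rest =>
      let p := rest.foldl pvStepB (out, c0)
      p.1 ++ [p.2]) []

-- ===== PRECONDITION & SPEC =====
def Spec_merge_contiguous_events (day_events : List (List (String × String))) (out : List (List (String × String))) : Prop := out = merge_contiguous_events_alt day_events
instance (day_events : List (List (String × String))) (out : List (List (String × String))) : Decidable (Spec_merge_contiguous_events day_events out) := by unfold Spec_merge_contiguous_events; infer_instance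

-- ===== CLAIM (what is proved, stated in full; the proofs are below) =====
def Claim_equal_merge_contiguous_events : Prop := ∀ (day_events : List (List (String × String))), Dom_merge_contiguous_events day_events → Spec_merge_contiguous_events day_events (merge_contiguous_events day_events)

-- ===== LEMMAS AND PROOFS =====

-- abbreviations for the three sort keys (definitionally the ports' inline lambdas)
def evGK (e : List (String × String)) : List (List Char) :=
  [(pvGet e "LOCATION" "").toList, (pvGet e "SUMMARY" "").toList]

def evTK (e : List (String × String)) : List (List Char) :=
  [(pvGet e "TimeSTART" "").toList, (pvGet e "TimeEND" "").toList]

def evFK (e : List (String × String)) : List (List Char) :=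
  [(pvGet e "LOCATION" "").toList, (pvGet e "SUMMARY" "").toList,
   (pvGet e "TimeSTART" "").toList, (pvGet e "TimeEND" "").toList]

def pvKeys (xs : List (List (String × String))) : List (List (List Char)) :=
  PySem.List.sorted (PySem.Set.ofList (xs.map evGK)) (fun k => k) false

def pvBlock (xs : List (List (String × String))) (k : List (List Char)) :
    List (List (String × String)) :=
  PySem.List.sorted (xs.filter (fun e => decide (evGK e = k))) evTK false

def pvBodyB (xs : List (List (String × String))) (out : List (List (String × String)))
    (k : List (List Char)) : List (List (String × String)) :=
  match pvBlock xs k with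
  | [] => out
  | c0 :: rest =>
    let p := rest.foldl pvStepB (out, c0)
    p.1 ++ [p.2]

def pvFlush (st : List (List (String × String)) × Option (List (String × String))) :
    List (List (String × String)) :=
  match st.2 with
  | none => st.1
  | some cur => st.1 ++ [cur]

theorem alt_eq (xs : List (List (String × String))) :
    merge_contiguous_events_alt xs = (pvKeys xs).foldl (pvBodyB xs) [] := rfl

theorem a_eq (xs : List (List (String × String))) :
    merge_contiguous_events xs =
      if xs = [] then []
      else pvFlush ((PySem.List.sorted xs evFK false).foldl pvStepA ([], none)) := rfl

-- pvGet / pvSet ---------------------------------------------------------------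

theorem pvGet_pvSet_ne (e : List (String × String)) (k k' v d : String) (h : k ≠ k') :
    pvGet (pvSet e k v) k' d = pvGet e k' d := by
  induction e with
  | nil => simp [pvSet, pvGet, h]
  | cons hd t ih =>
    obtain ⟨a, b⟩ := hd
    by_cases hak : a = k
    · subst hak; simp [pvSet, pvGet, h]
    · simp [pvSet, pvGet, hak, ih]

theorem evGK_pvSet_timeend (c : List (String × String)) (v : String) :
    evGK (pvSet c "TimeEND" v) = evGK c := by
  simp [evGK, pvGet_pvSet_ne _ _ _ _ _ (by decide : ("TimeEND" : String) ≠ "LOCATION"),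
        pvGet_pvSet_ne _ _ _ _ _ (by decide : ("TimeEND" : String) ≠ "SUMMARY")]

theorem insertBy_nil {α : Type} (b : α → α → Bool) (x : α) :
    PySem.List.insertBy b x [] = [x] := rfl

theorem insertBy_cons {α : Type} (b : α → α → Bool) (x y : α) (ys : List α) :
    PySem.List.insertBy b x (y :: ys) =
      if b x y then x :: y :: ys else y :: PySem.List.insertBy b x ys := rfl

-- insertion-sort stability ----------------------------------------------------

-- Decidable instances are proof-irrelevant, so sorted does not depend on which one was inferred
theorem sorted_irrel {α κ : Type} [LT κ] (d1 d2 : DecidableLT κ) (xs : List α) (key : α → κ)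
    (rev : Bool) :
    @PySem.List.sorted α κ _ d1 xs key rev = @PySem.List.sorted α κ _ d2 xs key rev := by
  have h : d1 = d2 := by funext a b; exact Subsingleton.elim _ _
  rw [h]

theorem pairwise_insertBy {α κ : Type} [LinearOrder κ] (key : α → κ) (x : α) (acc : List α)
    (h : acc.Pairwise (fun a b => key a ≤ key b)) :
    (PySem.List.insertBy (fun a b => decide (key a < key b)) x acc).Pairwise
      (fun a b => key a ≤ key b) := by
  induction acc with
  | nil => simp [insertBy_nil]
  | cons y t ih =>
    rcases List.pairwise_cons.mp h with ⟨hy, ht⟩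
    rw [insertBy_cons]
    by_cases hxy : key x < key y
    · simp only [hxy, decide_true, if_true]
      refine List.pairwise_cons.mpr ⟨?_, h⟩
      intro z hz
      rcases List.mem_cons.mp hz with rfl | hz
      · exact hxy.le
      · exact hxy.le.trans (hy z hz)
    · simp only [hxy, decide_false, Bool.false_eq_true, if_false]
      refine List.pairwise_cons.mpr ⟨?_, ih ht⟩
      intro z hz
      rcases (PySem.List.mem_insertBy _ _ _ _).mp hz with rfl | hz
      · exact not_lt.mp hxy
      · exact hy z hz

theorem filter_insertBy {α κ : Type} [LinearOrder κ] [DecidableEq α] [DecidableEq κ] (key : α → κ) (x : α)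
    (acc : List α) (c : κ) (h : acc.Pairwise (fun a b => key a ≤ key b)) :
    (PySem.List.insertBy (fun a b => decide (key a < key b)) x acc).filter
        (fun a => decide (key a = c))
      = acc.filter (fun a => decide (key a = c)) ++ (if key x = c then [x] else []) := by
  induction acc with
  | nil =>
    rw [insertBy_nil]
    by_cases hx : key x = c <;> simp [hx]
  | cons y t ih =>
    rcases List.pairwise_cons.mp h with ⟨hy, ht⟩
    rw [insertBy_cons]
    by_cases hxy : key x < key y
    · simp only [hxy, decide_true, if_true]
      by_cases hx : key x = c
      · have hnil : (y :: t).filter (fun a => decide (key a = c)) = [] := by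
          rw [List.filter_eq_nil_iff]
          intro z hz
          have hle : key y ≤ key z := by
            rcases List.mem_cons.mp hz with rfl | hz
            · exact le_refl _
            · exact hy z hz
          have : c < key z := lt_of_lt_of_le (hx ▸ hxy) hle
          simp [ne_of_gt this]
        rw [List.filter_cons_of_pos (by simp [hx])]
        simp [hnil, hx]
      · rw [List.filter_cons_of_neg (by simp [hx])]
        simp [hx]
    · simp only [hxy, decide_false, Bool.false_eq_true, if_false]
      by_cases hyc : key y = c
      · rw [List.filter_cons_of_pos (by simp [hyc]), List.filter_cons_of_pos (by simp [hyc])]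
        rw [ih ht]
        simp
      · rw [List.filter_cons_of_neg (by simp [hyc]), List.filter_cons_of_neg (by simp [hyc])]
        exact ih ht

theorem filter_foldl_insertBy {α κ : Type} [LinearOrder κ] [DecidableEq α] [DecidableEq κ] (key : α → κ)
    (xs acc : List α) (c : κ) (h : acc.Pairwise (fun a b => key a ≤ key b)) :
    (xs.foldl (fun acc x => PySem.List.insertBy (fun a b => decide (key a < key b)) x acc)
        acc).filter (fun a => decide (key a = c))
      = acc.filter (fun a => decide (key a = c)) ++ xs.filter (fun a => decide (key a = c)) := by
  induction xs generalizing acc with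
  | nil => simp
  | cons x xs ih =>
    rw [List.foldl_cons, ih _ (pairwise_insertBy key x acc h), filter_insertBy key x acc c h]
    by_cases hx : key x = c
    · rw [List.filter_cons_of_pos (by simp [hx])]
      simp [hx]
    · rw [List.filter_cons_of_neg (by simp [hx])]
      simp [hx]

theorem sorted_filter_key {α κ : Type} [LinearOrder κ] [DecidableEq α] [DecidableEq κ] (key : α → κ)
    (xs : List α) (c : κ) :
    (PySem.List.sorted xs key false).filter (fun a => decide (key a = c))
      = xs.filter (fun a => decide (key a = c)) := by
  rw [PySem.List.sorted_eq_foldl_insertBy]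
  simpa using filter_foldl_insertBy key xs [] c (by simp)

theorem eq_of_pairwise_of_filters {α κ : Type} [LinearOrder κ] [DecidableEq α] [DecidableEq κ] (key : α → κ) :
    ∀ (ys zs : List α), ys.Pairwise (fun a b => key a ≤ key b) →
      zs.Pairwise (fun a b => key a ≤ key b) →
      (∀ c, ys.filter (fun a => decide (key a = c)) = zs.filter (fun a => decide (key a = c))) →
      ys = zs := by
  intro ys
  induction ys with
  | nil =>
    intro zs _ _ hf
    cases zs with
    | nil => rfl
    | cons b zs' =>
      exfalso
      have := hf (key b)
      rw [List.filter_nil, List.filter_cons_of_pos (by simp)] at this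
      exact List.cons_ne_nil _ _ this.symm
  | cons a ys' ih =>
    intro zs hy hz hf
    cases zs with
    | nil =>
      exfalso
      have := hf (key a)
      rw [List.filter_nil, List.filter_cons_of_pos (by simp)] at this
      exact List.cons_ne_nil _ _ this
    | cons b zs' =>
      rcases List.pairwise_cons.mp hy with ⟨hya, hy'⟩
      rcases List.pairwise_cons.mp hz with ⟨hzb, hz'⟩
      have hba : key b ≤ key a := by
        have ha : a ∈ (b :: zs').filter (fun z => decide (key z = key a)) := by
          rw [← hf]
          exact List.mem_filter.mpr ⟨List.mem_cons_self, by simp⟩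
        rcases List.mem_cons.mp (List.mem_of_mem_filter ha) with rfl | hmem
        · exact le_refl _
        · exact hzb a hmem
      have hab : key a ≤ key b := by
        have hb : b ∈ (a :: ys').filter (fun z => decide (key z = key b)) := by
          rw [hf]
          exact List.mem_filter.mpr ⟨List.mem_cons_self, by simp⟩
        rcases List.mem_cons.mp (List.mem_of_mem_filter hb) with rfl | hmem
        · exact le_refl _
        · exact hya b hmem
      have hkey : key a = key b := le_antisymm hab hba
      have hmain := hf (key a)
      rw [List.filter_cons_of_pos (by simp), List.filter_cons_of_pos (by simp [hkey])] at hmain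
      have hheads : a = b := (List.cons.injEq _ _ _ _).mp hmain |>.1
      have htails : ∀ c, ys'.filter (fun z => decide (key z = c))
          = zs'.filter (fun z => decide (key z = c)) := by
        intro c
        by_cases hc : c = key a
        · subst hc
          exact ((List.cons.injEq _ _ _ _).mp hmain).2
        · have := hf c
          rw [List.filter_cons_of_neg (by simp; exact fun hh => hc hh.symm),
              List.filter_cons_of_neg (by simp; exact fun hh => hc (hkey ▸ hh).symm)] at this
          exact this
      rw [hheads, ih zs' hy' hz' htails]

theorem sorted_eq_of_pairwise_of_filters {α κ : Type} [LinearOrder κ] [DecidableEq α] [DecidableEq κ]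
    (key : α → κ) (xs zs : List α) (hp : zs.Pairwise (fun a b => key a ≤ key b))
    (hf : ∀ c, xs.filter (fun a => decide (key a = c)) = zs.filter (fun a => decide (key a = c))) :
    PySem.List.sorted xs key false = zs := by
  refine eq_of_pairwise_of_filters key _ _ (PySem.List.sorted_pairwise xs key) hp ?_
  intro c
  rw [sorted_filter_key key xs c]
  exact hf c

-- order facts on the concrete keys --------------------------------------------

theorem fk_lt_of_gk_lt (a b : List (String × String)) (h : evGK a < evGK b) :
    evFK a < evFK b := by
  simp only [evGK, List.cons_lt_cons_iff, List.not_lt_nil] at h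
  simp only [evFK, List.cons_lt_cons_iff]
  tauto

theorem fk_le_of_gk_eq_of_tk_le (a b : List (String × String)) (hg : evGK a = evGK b)
    (ht : evTK a ≤ evTK b) : evFK a ≤ evFK b := by
  simp only [evGK, List.cons.injEq, and_true] at hg
  obtain ⟨h1, h2⟩ := hg
  rcases lt_or_eq_of_le ht with hlt | heq
  · refine le_of_lt ?_
    simp only [evTK, List.cons_lt_cons_iff, List.not_lt_nil] at hlt
    simp only [evFK, List.cons_lt_cons_iff, h1, h2, lt_irrefl, false_or, true_and]
    tauto
  · refine le_of_eq ?_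
    simp only [evTK, List.cons.injEq, and_true] at heq
    simp only [evFK, h1, h2, heq.1, heq.2]

theorem fk_eq_iff (e : List (String × String)) (g t : List Char) (r s : List Char) :
    evFK e = [g, t, r, s] ↔ (evGK e = [g, t] ∧ evTK e = [r, s]) := by
  simp only [evFK, evGK, evTK, List.cons.injEq, and_true]
  tauto

theorem fk_length (e : List (String × String)) (c : List (List Char))
    (h : c.length ≠ 4) : evFK e ≠ c := by
  intro heq
  exact h (by rw [← heq]; rfl)

-- the sort decomposition ------------------------------------------------------

theorem mem_block (xs : List (List (String × String))) (k : List (List Char))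
    (e : List (String × String)) (he : e ∈ pvBlock xs k) : e ∈ xs ∧ evGK e = k := by
  have := (PySem.List.mem_sorted _ _ _ _).mp he
  have := List.mem_filter.mp this
  exact ⟨this.1, by simpa using this.2⟩

theorem block_ne_nil (xs : List (List (String × String))) (k : List (List Char))
    (hk : k ∈ pvKeys xs) : pvBlock xs k ≠ [] := by
  have hk1 : k ∈ PySem.Set.ofList (xs.map evGK) := (PySem.List.mem_sorted _ _ _ _).mp hk
  have hk2 : k ∈ xs.map evGK := (PySem.Set.mem_ofList (xs.map evGK) k).mp hk1
  rcases List.mem_map.mp hk2 with ⟨e, he, rfl⟩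
  intro hnil
  rw [pvBlock, PySem.List.sorted_eq_nil_iff] at hnil
  have : e ∈ xs.filter (fun e' => decide (evGK e' = evGK e)) :=
    List.mem_filter.mpr ⟨he, by simp⟩
  rw [hnil] at this
  exact absurd this (List.not_mem_nil)

theorem keys_pairwise (xs : List (List (String × String))) :
    (pvKeys xs).Pairwise (· < ·) := by
  unfold pvKeys
  rw [sorted_irrel _ LinearOrder.toDecidableLT]
  exact PySem.List.sorted_ofList_pairwise_lt (xs.map evGK)

theorem keys_nodup (xs : List (List (String × String))) : (pvKeys xs).Nodup :=
  (PySem.List.sorted_perm _ _ _).nodup_iff.mpr (PySem.Set.nodup_ofList _)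

theorem mem_keys_of_mem (xs : List (List (String × String))) (e : List (String × String))
    (he : e ∈ xs) : evGK e ∈ pvKeys xs :=
  (PySem.List.mem_sorted _ _ _ _).mpr
    ((PySem.Set.mem_ofList (xs.map evGK) (evGK e)).mpr (List.mem_map_of_mem he))

theorem flatten_map_single {κ α : Type} [DecidableEq κ] (ks : List κ) (f : κ → List α)
    (g : κ) (hnd : ks.Nodup) (h : ∀ k ∈ ks, k ≠ g → f k = []) :
    (ks.map f).flatten = if g ∈ ks then f g else [] := by
  induction ks with
  | nil => simp
  | cons k ks ih =>
    rcases List.nodup_cons.mp hnd with ⟨hk, hnd'⟩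
    rw [List.map_cons, List.flatten_cons,
        ih hnd' (fun k' hk' hne => h k' (List.mem_cons_of_mem _ hk') hne)]
    by_cases hkg : k = g
    · subst hkg
      rw [if_neg hk, if_pos List.mem_cons_self]
      simp
    · rw [h k List.mem_cons_self hkg]
      simp only [List.nil_append]
      by_cases hgks : g ∈ ks
      · rw [if_pos hgks, if_pos (List.mem_cons_of_mem _ hgks)]
      · rw [if_neg hgks, if_neg ?_]
        intro hmem
        rcases List.mem_cons.mp hmem with rfl | hh
        · exact hkg rfl
        · exact hgks hh

theorem block_pairwise (xs : List (List (String × String))) (k : List (List Char)) :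
    (pvBlock xs k).Pairwise (fun a b => evTK a ≤ evTK b) := by
  unfold pvBlock
  rw [sorted_irrel _ LinearOrder.toDecidableLT]
  exact PySem.List.sorted_pairwise _ _

theorem sort_decomposition (xs : List (List (String × String))) :
    PySem.List.sorted xs evFK false = ((pvKeys xs).map (pvBlock xs)).flatten := by
  rw [sorted_irrel _ LinearOrder.toDecidableLT]
  refine sorted_eq_of_pairwise_of_filters evFK xs _ ?_ ?_
  · rw [List.pairwise_flatten]
    constructor
    · intro l hl
      rcases List.mem_map.mp hl with ⟨k, hk, rfl⟩
      refine (block_pairwise xs k).imp_of_mem ?_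
      intro a b ha hb hab
      exact fk_le_of_gk_eq_of_tk_le a b
        (by rw [(mem_block xs k a ha).2, (mem_block xs k b hb).2]) hab
    · rw [List.pairwise_map]
      refine (keys_pairwise xs).imp ?_
      intro k1 k2 hlt a ha b hb
      exact (fk_lt_of_gk_lt a b
        (by rw [(mem_block _ _ _ ha).2, (mem_block _ _ _ hb).2]; exact hlt)).le
  · intro c
    rw [List.filter_flatten, List.map_map]
    simp only [Function.comp_def]
    by_cases h4 : c.length = 4
    · rcases c with _ | ⟨g, c⟩; · simp at h4
      rcases c with _ | ⟨t, c⟩; · simp at h4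
      rcases c with _ | ⟨r, c⟩; · simp at h4
      rcases c with _ | ⟨s, c⟩; · simp at h4
      rcases c with _ | ⟨u, c⟩; swap; · simp at h4
      have hb : ∀ k ∈ pvKeys xs, k ≠ [g, t] →
          (pvBlock xs k).filter (fun a => decide (evFK a = [g, t, r, s])) = [] := by
        intro k _ hne
        rw [List.filter_eq_nil_iff]
        intro e he
        simp only [decide_eq_true_eq]
        intro heq
        exact hne (((mem_block xs k e he).2).symm.trans ((fk_eq_iff e g t r s).mp heq).1)
      rw [flatten_map_single (pvKeys xs) _ [g, t] (keys_nodup xs) hb]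
      by_cases hmem : [g, t] ∈ pvKeys xs
      · rw [if_pos hmem]
        have h1 : (pvBlock xs [g, t]).filter (fun a => decide (evFK a = [g, t, r, s]))
            = (pvBlock xs [g, t]).filter (fun a => decide (evTK a = [r, s])) := by
          refine List.filter_congr ?_
          intro e he
          have hg := (mem_block _ _ _ he).2
          simp [fk_eq_iff, hg]
        have h2 : (pvBlock xs [g, t]).filter (fun a => decide (evTK a = [r, s]))
            = (xs.filter (fun e => decide (evGK e = [g, t]))).filter
                (fun a => decide (evTK a = [r, s])) := by
          unfold pvBlock
          rw [sorted_irrel _ LinearOrder.toDecidableLT]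
          exact sorted_filter_key evTK _ _
        have h3 : (xs.filter (fun e => decide (evGK e = [g, t]))).filter
              (fun a => decide (evTK a = [r, s]))
            = xs.filter (fun a => decide (evFK a = [g, t, r, s])) := by
          rw [List.filter_filter]
          refine List.filter_congr ?_
          intro e _
          simp [fk_eq_iff, Bool.and_comm]
        rw [h1, h2, h3]
      · rw [if_neg hmem, List.filter_eq_nil_iff]
        intro e he
        simp only [decide_eq_true_eq]
        intro heq
        exact hmem (((fk_eq_iff e g t r s).mp heq).1 ▸ mem_keys_of_mem xs e he)
    · have hl : xs.filter (fun a => decide (evFK a = c)) = [] := by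
        rw [List.filter_eq_nil_iff]
        intro e _
        simp only [decide_eq_true_eq]
        exact fk_length e c h4
      rw [hl, eq_comm, List.flatten_eq_nil_iff]
      intro l hl'
      rcases List.mem_map.mp hl' with ⟨k, _, rfl⟩
      rw [List.filter_eq_nil_iff]
      intro e _
      simp only [decide_eq_true_eq]
      exact fk_length e c h4

-- the merge decomposition -----------------------------------------------------

theorem stepA_same (out : List (List (String × String))) (c e : List (String × String))
    (h : evGK e = evGK c) :
    pvStepA (out, some c) e =
      ((pvStepB (out, c) e).1, some (pvStepB (out, c) e).2) ∧
      evGK (pvStepB (out, c) e).2 = evGK c := by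
  have hc : pvGet e "LOCATION" "" = pvGet c "LOCATION" ""
      ∧ pvGet e "SUMMARY" "" = pvGet c "SUMMARY" "" := by
    simpa [evGK, String.toList_inj] using h
  constructor
  · simp only [pvStepA, pvStepB]
    rw [if_pos hc]
    split_ifs <;> rfl
  · simp only [pvStepB]
    split_ifs
    · exact evGK_pvSet_timeend c _
    · rfl
    · exact h

theorem stepA_diff (out : List (List (String × String))) (c e : List (String × String))
    (h : evGK e ≠ evGK c) :
    pvStepA (out, some c) e = (out ++ [c], some e) := by
  have hc : ¬(pvGet e "LOCATION" "" = pvGet c "LOCATION" ""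
      ∧ pvGet e "SUMMARY" "" = pvGet c "SUMMARY" "") := by
    rintro ⟨h1, h2⟩
    exact h (by simp [evGK, h1, h2])
  simp only [pvStepA]
  rw [if_neg hc]

theorem foldl_stepA_block (bs : List (List (String × String))) :
    ∀ (out : List (List (String × String))) (c : List (String × String)),
      (∀ e ∈ bs, evGK e = evGK c) →
      bs.foldl pvStepA (out, some c) =
        ((bs.foldl pvStepB (out, c)).1, some (bs.foldl pvStepB (out, c)).2) ∧
      evGK (bs.foldl pvStepB (out, c)).2 = evGK c := by
  induction bs with
  | nil => exact fun out c _ => ⟨rfl, rfl⟩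
  | cons e bs ih =>
    intro out c hall
    have he : evGK e = evGK c := hall e List.mem_cons_self
    obtain ⟨heq, hgk⟩ := stepA_same out c e he
    rw [List.foldl_cons, List.foldl_cons, heq]
    have hall' : ∀ e' ∈ bs, evGK e' = evGK (pvStepB (out, c) e).2 :=
      fun e' h' => (hall e' (List.mem_cons_of_mem _ h')).trans hgk.symm
    obtain ⟨ha, hb⟩ := ih (pvStepB (out, c) e).1 (pvStepB (out, c) e).2 hall'
    constructor
    · simpa using ha
    · simpa using hb.trans hgk

theorem merge_decomposition (xs : List (List (String × String))) :
    ∀ (ks : List (List (List Char))) (out : List (List (String × String)))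
      (c : List (String × String)),
      ks.Pairwise (· < ·) → (∀ k ∈ ks, evGK c < k) →
      (∀ k ∈ ks, pvBlock xs k ≠ []) → (∀ k ∈ ks, ∀ e ∈ pvBlock xs k, evGK e = k) →
      pvFlush (((ks.map (pvBlock xs)).flatten).foldl pvStepA (out, some c))
        = ks.foldl (pvBodyB xs) (out ++ [c]) := by
  intro ks
  induction ks with
  | nil => exact fun out c _ _ _ _ => rfl
  | cons k ks ih =>
    intro out c hpw hlt hne hhom
    rcases List.pairwise_cons.mp hpw with ⟨hkk, hpw'⟩
    rcases hb : pvBlock xs k with _ | ⟨c0, rest⟩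
    · exact absurd hb (hne k List.mem_cons_self)
    · have hc0 : evGK c0 = k := hhom k List.mem_cons_self c0 (by rw [hb]; exact List.mem_cons_self)
      have hcne : evGK c0 ≠ evGK c := by
        rw [hc0]
        exact fun hh => absurd (hh ▸ hlt k List.mem_cons_self) (lt_irrefl _)
      rw [List.map_cons, List.flatten_cons, hb, List.foldl_append, List.foldl_cons,
          stepA_diff out c c0 hcne]
      have hrest : ∀ e ∈ rest, evGK e = evGK c0 := by
        intro e hee
        rw [hc0]
        exact hhom k List.mem_cons_self e (by rw [hb]; exact List.mem_cons_of_mem _ hee)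
      obtain ⟨ha, hgk⟩ := foldl_stepA_block rest (out ++ [c]) c0 hrest
      rw [ha]
      have hih := ih (rest.foldl pvStepB (out ++ [c], c0)).1
        (rest.foldl pvStepB (out ++ [c], c0)).2 hpw'
        (fun k' hk' => by rw [hgk, hc0]; exact hkk k' hk')
        (fun k' hk' => hne k' (List.mem_cons_of_mem _ hk'))
        (fun k' hk' => hhom k' (List.mem_cons_of_mem _ hk'))
      rw [List.foldl_cons]
      have hbody : pvBodyB xs (out ++ [c]) k
          = (rest.foldl pvStepB (out ++ [c], c0)).1 ++ [(rest.foldl pvStepB (out ++ [c], c0)).2] := by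
        simp only [pvBodyB, hb]
      rw [hbody]
      simpa using hih

-- ===== VERDICT (by name: the statement is the Claim_ definition above) =====
theorem merge_contiguous_events_spec : Claim_equal_merge_contiguous_events := by
  intro xs _
  unfold Spec_merge_contiguous_events
  rw [a_eq, alt_eq]
  by_cases hx : xs = []
  · subst hx; rfl
  · rw [if_neg hx, sort_decomposition]
    rcases hk : pvKeys xs with _ | ⟨k0, ks⟩
    · exfalso
      rcases List.exists_mem_of_ne_nil xs hx with ⟨e, he⟩
      have := mem_keys_of_mem xs e he
      rw [hk] at this
      exact absurd this (List.not_mem_nil)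
    · have hk0mem : k0 ∈ pvKeys xs := by rw [hk]; exact List.mem_cons_self
      rcases hb : pvBlock xs k0 with _ | ⟨c0, rest⟩
      · exact absurd hb (block_ne_nil xs k0 hk0mem)
      · have hpwk := keys_pairwise xs
        rw [hk] at hpwk
        rcases List.pairwise_cons.mp hpwk with ⟨hkk, hpw'⟩
        have hc0 : evGK c0 = k0 :=
          (mem_block xs k0 c0 (by rw [hb]; exact List.mem_cons_self)).2
        rw [List.map_cons, List.flatten_cons, hb, List.foldl_cons, List.foldl_append,
            List.foldl_cons]
        have hstep0 : pvStepA ([], none) c0 = ([], some c0) := rfl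
        rw [hstep0]
        have hrest : ∀ e ∈ rest, evGK e = evGK c0 := by
          intro e hee
          rw [hc0]
          exact (mem_block xs k0 e (by rw [hb]; exact List.mem_cons_of_mem _ hee)).2
        obtain ⟨ha, hgk⟩ := foldl_stepA_block rest [] c0 hrest
        rw [ha]
        have hmd := merge_decomposition xs ks (rest.foldl pvStepB ([], c0)).1
          (rest.foldl pvStepB ([], c0)).2 hpw'
          (fun k' hk' => by rw [hgk, hc0]; exact hkk k' hk')
          (fun k' hk' => block_ne_nil xs k' (by rw [hk]; exact List.mem_cons_of_mem _ hk'))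
          (fun k' hk' e he => (mem_block xs k' e he).2)
        have hbody : pvBodyB xs [] k0
            = (rest.foldl pvStepB ([], c0)).1 ++ [(rest.foldl pvStepB ([], c0)).2] := by
          simp only [pvBodyB, hb]
        rw [hbody]
        simpa using hmd
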